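-- pv_equiv track=rewrite | github.com/payel-bhunia/pythonProgramming | Heap/negationBtimes.py | solve
-- ===== SOURCE A (Python) =====
-- def heapify(arr, n, index):
--     largest = index
--     l = 2 * index + 1
--     r = 2 * index + 2
--     if l < n:
--         if arr[l] < arr[largest]:
--             largest = l
--     if r < n:
--         if arr[r] < arr[largest]:
--             largest = r
--     if index != largest:
--         arr[index], arr[largest] = arr[largest], arr[index]
--         heapify(arr, n, largest)
--
-- def buildMinHeap(arr, n):
--     index = n // 2 - 1
--     while index > -1:
--         heapify(arr, n, index)
--         index -= 1
--
-- def solve(A, B):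
--     n = len(A)
--     b = B
--     if B < n // 2:
--         while B > 0:
--             buildMinHeap(A, n)
--             A[0], A[n - 1] = A[n - 1], A[0]
--             A[n - 1] = -1 * A[n - 1]
--             B -= 1
--         return sum(A)
--     else:
--         A.sort()
--         i = 0
--         while B > 0:
--             if i < n:
--                 if A[i] < 0:
--                     A[i] = -1 * A[i]
--                     B -= 1
--                     i += 1
--                 else:
--                     break
--             else:
--                 break
--
--         if B > 0:
--             min_ele = A[0]
--             index = 0
--             for i in range(1, n):
--                 if A[i] < min_ele:
--                     min_ele = A[i]
--                     index = i
--             while B > 0: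
--                 A[index] = (-1) * A[index]
--                 B -= 1
--         return sum(A)
-- ===== SOURCE B (Python) =====
-- def solve(A, B):
--     vals = sorted(A)
--     k = 0
--     b = B
--     while k < len(vals) and b > 0 and vals[k] < 0:
--         vals[k] = -vals[k]
--         b += -1
--         k += 1
--     s = sum(vals)
--     if b > 0 and b % 2 == 1:
--         s -= 2 * min(vals)
--     return s
-- ===== Notes on version B (the rewrite author's own statement) =====
-- stated objective: alternative
-- what changed: B replaces A's B-fold rebuild-a-min-heap-and-negate loop (and A's post-sort repeated negation loop) by one sort, one linear pass flipping negatives, and a closed-form parity adjustment of the minimum for the leftover budget.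
import Mathlib
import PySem

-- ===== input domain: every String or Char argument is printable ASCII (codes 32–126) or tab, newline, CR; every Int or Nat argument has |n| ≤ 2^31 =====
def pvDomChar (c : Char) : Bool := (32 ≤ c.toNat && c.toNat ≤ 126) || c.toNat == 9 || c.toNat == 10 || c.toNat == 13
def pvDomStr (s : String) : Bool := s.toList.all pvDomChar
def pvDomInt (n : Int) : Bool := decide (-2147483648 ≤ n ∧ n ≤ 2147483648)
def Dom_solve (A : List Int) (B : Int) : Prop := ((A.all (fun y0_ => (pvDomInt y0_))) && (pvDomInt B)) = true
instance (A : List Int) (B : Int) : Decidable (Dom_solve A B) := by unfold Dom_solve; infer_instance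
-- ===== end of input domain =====

-- B negates the minimum element B times via one sort, one pass flipping negatives and a parity adjustment,
-- instead of A's B-fold heap rebuilds; equivalence is about the RETURN value only: Python A mutates/sorts
-- its argument in place, B does not.

-- ===== PORT A =====
-- arr[index], arr[largest] = arr[largest], arr[index]  (both getD reads are on the original list, as in Python;
-- indices are in range at every call site reached under Pre_)
def pySwap (l : List Int) (i j : Nat) : List Int :=
  (l.set i (l.getD j 0)).set j (l.getD i 0)

-- the two guarded comparisons of heapify computing `largest` (same comparisons, same order)
def m1Of (arr : List Int) (n index : Nat) : Nat :=
  if 2*index+1 < n ∧ arr.getD (2*index+1) 0 < arr.getD index 0 then 2*index+1 else index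
def largestOf (arr : List Int) (n index : Nat) : Nat :=
  if 2*index+2 < n ∧ arr.getD (2*index+2) 0 < arr.getD (m1Of arr n index) 0 then 2*index+2
  else m1Of arr n index

def heapify (arr : List Int) (n index : Nat) : List Int :=
  if index ≠ largestOf arr n index then
    heapify (pySwap arr index (largestOf arr n index)) n (largestOf arr n index)
  else arr
termination_by n - index
decreasing_by
  rename_i h
  have hb : largestOf arr n index = index ∨
      (index < largestOf arr n index ∧ largestOf arr n index < n) := by
    unfold largestOf m1Of; split_ifs <;> omega
  omega

-- while index > -1: heapify(arr, n, index); index -= 1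
def buildLoop (arr : List Int) (n : Nat) (index : Int) : List Int :=
  if index > -1 then buildLoop (heapify arr n index.toNat) n (index - 1) else arr
termination_by (index + 1).toNat
decreasing_by omega

def buildMinHeap (arr : List Int) (n : Nat) : List Int :=
  buildLoop arr n (PySem.Int.floordiv (n : Int) 2 - 1)

-- branch-1 while loop: build heap, swap A[0] and A[n-1], negate A[n-1]
def loop1 (arr : List Int) (n : Nat) (B : Int) : List Int :=
  if B > 0 then
    loop1 ((pySwap (buildMinHeap arr n) 0 (n-1)).set (n-1)
      (-((pySwap (buildMinHeap arr n) 0 (n-1)).getD (n-1) 0))) n (B-1)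
  else arr
termination_by B.toNat
decreasing_by omega

-- branch-2 first while loop (flip negatives left to right, in place)
def flipLoopA (arr : List Int) (n i : Nat) (B : Int) : List Int × Nat × Int :=
  if B > 0 then
    if i < n then
      if arr.getD i 0 < 0 then flipLoopA (arr.set i (-(arr.getD i 0))) n (i+1) (B-1)
      else (arr, i, B)
    else (arr, i, B)
  else (arr, i, B)
termination_by B.toNat
decreasing_by omega

-- min_ele = A[0]; for i in range(1, n): …   (range(1,n) = List.range' 1 (n-1);
-- A[0] raises IndexError when n = 0 with B > 0: exactly what Pre_ excludes)
def minScan (arr : List Int) (n : Nat) : Int × Nat :=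
  (List.range' 1 (n - 1)).foldl
    (fun p i => if arr.getD i 0 < p.1 then (arr.getD i 0, i) else p)
    (arr.getD 0 0, 0)

-- final while loop: A[index] = (-1) * A[index], B times
def negLoop (arr : List Int) (idx : Nat) (B : Int) : List Int :=
  if B > 0 then negLoop (arr.set idx (-(arr.getD idx 0))) idx (B - 1) else arr
termination_by B.toNat
decreasing_by omega

-- the code after the first while loop of the else-branch
def branch2rest (arr : List Int) (n : Nat) (B : Int) : Int :=
  if B > 0 then (negLoop arr (minScan arr n).2 B).sum else arr.sum

def solve (A : List Int) (B : Int) : Int :=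
  let n := A.length
  if B < PySem.Int.floordiv (n : Int) 2 then
    (loop1 A n B).sum
  else
    let r := flipLoopA (PySem.List.sorted A (fun x => x) false) n 0 B
    branch2rest r.1 n r.2.2

-- ===== PORT B =====
-- while k < len(vals) and b > 0 and vals[k] < 0: flip vals[k]
def flipLoopB (vals : List Int) (k : Nat) (b : Int) : List Int × Int :=
  if k < vals.length ∧ b > 0 ∧ vals.getD k 0 < 0 then
    flipLoopB (vals.set k (-(vals.getD k 0))) (k+1) (b-1)
  else (vals, b)
termination_by vals.length - k
decreasing_by simp [List.length_set]; omega

-- s = sum(vals); parity adjustment (min([]) raises ValueError when vals = [] with odd b > 0: excluded by Pre_)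
def altRest (v : List Int) (b : Int) : Int :=
  if b > 0 ∧ PySem.Int.mod b 2 = 1 then v.sum - 2 * ((PySem.List.min? v (fun y => y)).getD 0)
  else v.sum

def solve_alt (A : List Int) (B : Int) : Int :=
  let r := flipLoopB (PySem.List.sorted A (fun x => x) false) 0 B
  altRest r.1 r.2

-- ===== PRECONDITION & SPEC =====
-- Pre_ excludes exactly the inputs where Python A raises: A = [] with B > 0 (IndexError at `min_ele = A[0]`).
def Pre_solve (A : List Int) (B : Int) : Prop := A = [] → B ≤ 0
instance (A : List Int) (B : Int) : Decidable (Pre_solve A B) := by unfold Pre_solve; infer_instance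

def pvWitness_solve : List Int × Int := ([1, -2, 3], 2)

def Spec_solve (A : List Int) (B : Int) (out : Int) : Prop := out = solve_alt A B
instance (A : List Int) (B : Int) (out : Int) : Decidable (Spec_solve A B out) := by unfold Spec_solve; infer_instance

-- ===== CLAIM (what is proved, stated in full; the proofs are below) =====
def Claim_equal_solve : Prop := ∀ (A : List Int) (B : Int), Dom_solve A B → Pre_solve A B → Spec_solve A B (solve A B)

-- ===== LEMMAS AND PROOFS =====

-- ---------- proof-side abbreviations ----------
def sortL (l : List Int) : List Int := PySem.List.sorted l (fun x => x) false
def insortI (x : Int) (l : List Int) : List Int := List.orderedInsert (· ≤ ·) x l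

-- "negate the minimum, b times" on a sorted list: the abstract program both ports compute
def G : Nat → List Int → Int
  | 0, l => l.sum
  | _+1, [] => 0
  | b+1, x :: xs => G b (insortI (-x) xs)

lemma G_zero (l : List Int) : G 0 l = l.sum := rfl
lemma G_succ_cons (b : Nat) (x : Int) (xs : List Int) :
    G (b+1) (x :: xs) = G b (insortI (-x) xs) := rfl

-- ---------- small getD / set / perm toolkit ----------
lemma getD_eq_getElem (l : List Int) (i : Nat) (h : i < l.length) : l.getD i 0 = l[i] := by
  rw [List.getD_eq_getElem?_getD, List.getElem?_eq_getElem h]; rfl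

lemma getD_mem (l : List Int) (i : Nat) (h : i < l.length) : l.getD i 0 ∈ l := by
  rw [getD_eq_getElem l i h]; exact List.getElem_mem h

lemma getD_set_ne (l : List Int) (i k : Nat) (v : Int) (h : k ≠ i) :
    (l.set i v).getD k 0 = l.getD k 0 := by
  rw [List.getD_eq_getElem?_getD, List.getD_eq_getElem?_getD,
    List.getElem?_set_ne (id (Ne.symm h))]

lemma getD_set_self (l : List Int) (i : Nat) (v : Int) (h : i < l.length) :
    (l.set i v).getD i 0 = v := by
  rw [List.getD_eq_getElem?_getD, List.getElem?_set_self h]; rfl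

lemma sum_set (l : List Int) (i : Nat) (v : Int) (h : i < l.length) :
    (l.set i v).sum = l.sum - l.getD i 0 + v := by
  have h1 := (List.set_perm_cons_eraseIdx h v).sum_eq
  have h2 := (List.getElem_cons_eraseIdx_perm h).sum_eq
  simp only [List.sum_cons] at h1 h2
  rw [getD_eq_getElem l i h]; omega

lemma length_pySwap (l : List Int) (i j : Nat) : (pySwap l i j).length = l.length := by
  simp [pySwap]

lemma getD_pySwap_fst (l : List Int) (i j : Nat) (hi : i < l.length) (hj : j < l.length) :
    (pySwap l i j).getD j 0 = l.getD i 0 := by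
  unfold pySwap
  rw [getD_set_self _ _ _ (by simpa using hj)]

lemma getD_pySwap_snd (l : List Int) (i j : Nat) (hi : i < l.length) (hne : i ≠ j) :
    (pySwap l i j).getD i 0 = l.getD j 0 := by
  unfold pySwap
  rw [getD_set_ne _ _ _ _ hne, getD_set_self _ _ _ hi]

lemma getD_pySwap_other (l : List Int) (i j k : Nat) (hk1 : k ≠ i) (hk2 : k ≠ j) :
    (pySwap l i j).getD k 0 = l.getD k 0 := by
  unfold pySwap
  rw [getD_set_ne _ _ _ _ hk2, getD_set_ne _ _ _ _ hk1]

lemma pySwap_perm : ∀ (l : List Int) (i j : Nat), i < l.length → j < l.length →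
    (pySwap l i j).Perm l := by
  intro l
  induction l with
  | nil => intro i j hi _; simp at hi
  | cons x t ih =>
    intro i j hi hj
    match i, j with
    | 0, 0 => simp [pySwap]
    | 0, j+1 =>
      have hj' : j < t.length := by simpa using hj
      have hrw : pySwap (x :: t) 0 (j+1) = t.getD j 0 :: t.set j x := by
        simp [pySwap]
      rw [hrw]
      refine ((List.set_perm_cons_eraseIdx hj' x).cons _).trans ?_
      refine (List.Perm.swap x (t.getD j 0) (t.eraseIdx j)).trans ?_
      refine List.Perm.cons x ?_
      rw [getD_eq_getElem t j hj']
      exact List.getElem_cons_eraseIdx_perm hj'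
    | i+1, 0 =>
      have hi' : i < t.length := by simpa using hi
      have hrw : pySwap (x :: t) (i+1) 0 = t.getD i 0 :: t.set i x := by
        simp [pySwap]
      rw [hrw]
      refine ((List.set_perm_cons_eraseIdx hi' x).cons _).trans ?_
      refine (List.Perm.swap x (t.getD i 0) (t.eraseIdx i)).trans ?_
      refine List.Perm.cons x ?_
      rw [getD_eq_getElem t i hi']
      exact List.getElem_cons_eraseIdx_perm hi'
    | i+1, j+1 =>
      have hrw : pySwap (x :: t) (i+1) (j+1) = x :: pySwap t i j := by
        simp [pySwap]
      rw [hrw]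
      exact (ih i j (by simpa using hi) (by simpa using hj)).cons x

lemma getElem_mem_drop_succ (arr : List Int) (i k : Nat) (hik : i < k) (hk : k < arr.length) :
    arr[k] ∈ arr.drop (i+1) := by
  have h1 : k - (i+1) < (arr.drop (i+1)).length := by simp [List.length_drop]; omega
  have h2 : (arr.drop (i+1))[k - (i+1)] = arr[k]'hk := by
    rw [List.getElem_drop]
    congr 1
    omega
  rw [← h2]
  exact List.getElem_mem h1

-- ---------- the heap-index descendant relation ----------
inductive Desc (i : Nat) : Nat → Prop
  | refl : Desc i i
  | left {j : Nat} : Desc i j → Desc i (2*j+1)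
  | right {j : Nat} : Desc i j → Desc i (2*j+2)

lemma Desc.le {i k : Nat} (h : Desc i k) : i ≤ k := by
  induction h <;> omega

lemma Desc.lb {i k : Nat} (h : Desc i k) (hne : k ≠ i) : 2*i+1 ≤ k := by
  cases h with
  | refl => omega
  | left h => have := h.le; omega
  | right h => have := h.le; omega

lemma Desc.trans' {i j k : Nat} (h1 : Desc i j) (h2 : Desc j k) : Desc i k := by
  induction h2 with
  | refl => exact h1
  | left _ ih => exact ih.left
  | right _ ih => exact ih.right

lemma Desc.parent {i k : Nat} (h : Desc i k) (hne : k ≠ i) :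
    ∃ j, Desc i j ∧ (k = 2*j+1 ∨ k = 2*j+2) := by
  cases h with
  | refl => exact absurd rfl hne
  | left h => exact ⟨_, h, Or.inl rfl⟩
  | right h => exact ⟨_, h, Or.inr rfl⟩

lemma Desc.split {i k : Nat} (h : Desc i k) :
    k = i ∨ Desc (2*i+1) k ∨ Desc (2*i+2) k := by
  induction h with
  | refl => exact Or.inl rfl
  | @left j h ih =>
    rcases ih with rfl | h1 | h1
    · exact Or.inr (Or.inl Desc.refl)
    · exact Or.inr (Or.inl h1.left)
    · exact Or.inr (Or.inr h1.left)
  | @right j h ih =>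
    rcases ih with rfl | h1 | h1
    · exact Or.inr (Or.inr Desc.refl)
    · exact Or.inr (Or.inl h1.right)
    · exact Or.inr (Or.inr h1.right)

lemma desc_comparable : ∀ (x a b : Nat), Desc a x → Desc b x → Desc a b ∨ Desc b a := by
  intro x
  induction x using Nat.strong_induction_on with
  | _ x ih =>
    intro a b ha hb
    by_cases hxa : x = a
    · subst hxa; exact Or.inr hb
    by_cases hxb : x = b
    · subst hxb; exact Or.inl ha
    obtain ⟨j, hja, hx⟩ := ha.parent hxa
    obtain ⟨j', hjb, hx'⟩ := hb.parent hxb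
    have hjj : j = j' := by omega
    subst hjj
    exact ih j (by omega) a b hja hjb

lemma not_desc_of_siblings {i s c x : Nat} (hc : c = 2*i+1 ∨ c = 2*i+2)
    (hs : s = 2*i+1 ∨ s = 2*i+2) (hne : s ≠ c) (hx : Desc s x) : ¬ Desc c x := by
  intro hcx
  rcases desc_comparable x s c hx hcx with h | h
  · have h1 := h.le; have h2 := h.lb (by omega); omega
  · have h1 := h.le; have h2 := h.lb (by omega); omega

lemma desc_zero : ∀ k, Desc 0 k := by
  intro k
  induction k using Nat.strong_induction_on with
  | _ k ih =>
    rcases Nat.eq_zero_or_pos k with rfl | hk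
    · exact Desc.refl
    obtain ⟨j, rfl | rfl⟩ : ∃ j, k = 2*j+1 ∨ k = 2*j+2 := ⟨(k-1)/2, by omega⟩
    · exact (ih j (by omega)).left
    · exact (ih j (by omega)).right

-- ---------- heapify correctness ----------
def EdgeOK (arr : List Int) (n j : Nat) : Prop :=
  (2*j+1 < n → arr.getD j 0 ≤ arr.getD (2*j+1) 0) ∧
  (2*j+2 < n → arr.getD j 0 ≤ arr.getD (2*j+2) 0)

lemma largestOf_spec (arr : List Int) (n i : Nat) :
    (largestOf arr n i = i ∨
      ((largestOf arr n i = 2*i+1 ∨ largestOf arr n i = 2*i+2) ∧ largestOf arr n i < n)) ∧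
    arr.getD (largestOf arr n i) 0 ≤ arr.getD i 0 ∧
    (2*i+1 < n → arr.getD (largestOf arr n i) 0 ≤ arr.getD (2*i+1) 0) ∧
    (2*i+2 < n → arr.getD (largestOf arr n i) 0 ≤ arr.getD (2*i+2) 0) := by
  unfold largestOf m1Of
  split_ifs <;> refine ⟨?_, ?_, ?_, ?_⟩ <;> omega

lemma root_le_desc (arr : List Int) (n c : Nat)
    (E : ∀ j, Desc c j → EdgeOK arr n j) :
    ∀ k, Desc c k → k < n → arr.getD c 0 ≤ arr.getD k 0 := by
  intro k hk
  induction hk with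
  | refl => intro _; exact le_refl _
  | @left j h ih =>
    intro hkn
    exact le_trans (ih (by omega)) ((E j h).1 hkn)
  | @right j h ih =>
    intro hkn
    exact le_trans (ih (by omega)) ((E j h).2 hkn)

lemma heapify_main (n : Nat) : ∀ (fuel : Nat) (arr : List Int) (index : Nat),
    arr.length = n → n - index ≤ fuel →
    (heapify arr n index).length = n ∧
    (heapify arr n index).Perm arr ∧
    (∀ k, ¬ Desc index k → (heapify arr n index).getD k 0 = arr.getD k 0) ∧
    (∀ v : Int, (∀ k, Desc index k → k < n → v ≤ arr.getD k 0) →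
       ∀ k, Desc index k → k < n → v ≤ (heapify arr n index).getD k 0) ∧
    ((∀ j, Desc index j → j ≠ index → EdgeOK arr n j) →
       ∀ j, Desc index j → EdgeOK (heapify arr n index) n j) := by
  intro fuel
  induction fuel with
  | zero =>
    intro arr index hlen hf
    have hs := largestOf_spec arr n index
    have hL : largestOf arr n index = index := by
      rcases hs.1 with h | h
      · exact h
      · omega
    rw [heapify, hL, if_neg (fun h => h rfl)]
    refine ⟨hlen, List.Perm.refl _, fun k _ => rfl, fun v hv => hv, ?_⟩
    intro hpre j hj
    by_cases hji : j = index
    · subst hji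
      constructor <;> intro hc <;> exfalso <;> omega
    · exact hpre j hj hji
  | succ f ih =>
    intro arr index hlen hf
    have hs := largestOf_spec arr n index
    by_cases hL : index = largestOf arr n index
    · rw [heapify, ← hL, if_neg (fun h => h rfl)]
      refine ⟨hlen, List.Perm.refl _, fun k _ => rfl, fun v hv => hv, ?_⟩
      intro hpre j hj
      by_cases hji : j = index
      · subst hji
        refine ⟨fun hc => ?_, fun hc => ?_⟩
        · have := hs.2.2.1 hc; rw [← hL] at this; exact this
        · have := hs.2.2.2 hc; rw [← hL] at this; exact this
      · exact hpre j hj hji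
    · have hstep : heapify arr n index
          = heapify (pySwap arr index (largestOf arr n index)) n (largestOf arr n index) := by
        rw [heapify, if_pos hL]
      set L := largestOf arr n index with hLdef
      have hLn : L < n := by
        rcases hs.1 with h | h
        · exact absurd h.symm hL
        · exact h.2
      have hLgt : 2*index+1 ≤ L := by
        rcases hs.1 with h | h
        · exact absurd h.symm hL
        · omega
      have hin : index < n := by omega
      have hDiL : Desc index L := by
        rcases hs.1 with h | h
        · exact absurd h.symm hL
        · rcases h.1 with h1 | h1 <;> rw [h1]
          · exact Desc.refl.left
          · exact Desc.refl.right
      set arr' := pySwap arr index L with harr'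
      have hlen' : arr'.length = n := by rw [harr', length_pySwap, hlen]
      obtain ⟨r1, r2, r3, r4, r5⟩ := ih arr' L hlen' (by omega)
      have hswap_perm : arr'.Perm arr := pySwap_perm arr index L (by omega) (by omega)
      have hget_i : arr'.getD index 0 = arr.getD L 0 :=
        getD_pySwap_snd arr index L (by omega) (by omega)
      have hget_L : arr'.getD L 0 = arr.getD index 0 :=
        getD_pySwap_fst arr index L (by omega) (by omega)
      have hget_other : ∀ k, k ≠ index → k ≠ L → arr'.getD k 0 = arr.getD k 0 :=
        fun k h1 h2 => getD_pySwap_other arr index L k h1 h2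
      have hLnotdesc_index : ¬ Desc L index := fun h => by have := h.le; omega
      rw [hstep]
      refine ⟨r1, r2.trans hswap_perm, ?_, ?_, ?_⟩
      · -- positions outside the subtree of index are unchanged
        intro k hk
        have hkL : ¬ Desc L k := fun h => hk (hDiL.trans' h)
        rw [r3 k hkL,
          hget_other k (fun h => hk (h ▸ Desc.refl)) (fun h => hk (h ▸ hDiL))]
      · -- lower bounds on the subtree are preserved
        intro v hv k hk hkn
        have hv' : ∀ k', Desc L k' → k' < n → v ≤ arr'.getD k' 0 := by
          intro k' hk' hk'n
          by_cases hkL : k' = L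
          · subst hkL; rw [hget_L]; exact hv index Desc.refl hin
          · have := hk'.lb hkL
            rw [hget_other k' (by omega) hkL]
            exact hv k' (hDiL.trans' hk') hk'n
        by_cases hdLk : Desc L k
        · exact r4 v hv' k hdLk hkn
        · rw [r3 k hdLk]
          by_cases hki : k = index
          · subst hki; rw [hget_i]; exact hv L hDiL hLn
          · rw [hget_other k hki (fun h => hdLk (h ▸ Desc.refl))]
            exact hv k hk hkn
      · -- the heap property on the subtree is established
        intro hpre j hj
        have hEL : ∀ j', Desc L j' → EdgeOK arr n j' := by
          intro j' hj'
          have := hj'.le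
          exact hpre j' (hDiL.trans' hj') (by omega)
        have hedge_arr' : ∀ j', Desc L j' → j' ≠ L → EdgeOK arr' n j' := by
          intro j' hj' hne
          have hlb := hj'.lb hne
          have e := hEL j' hj'
          refine ⟨?_, ?_⟩ <;> intro hc
          · rw [hget_other j' (by omega) hne, hget_other (2*j'+1) (by omega) (by omega)]
            exact e.1 hc
          · rw [hget_other j' (by omega) hne, hget_other (2*j'+2) (by omega) (by omega)]
            exact e.2 hc
        have hpost := r5 hedge_arr'
        have hrootle : ∀ k, Desc L k → k < n → arr.getD L 0 ≤ arr.getD k 0 :=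
          root_le_desc arr n L hEL
        have hv' : ∀ k, Desc L k → k < n → arr.getD L 0 ≤ arr'.getD k 0 := by
          intro k hk hkn
          by_cases hkL : k = L
          · subst hkL; rw [hget_L]; exact hs.2.1
          · have := hk.lb hkL
            rw [hget_other k (by omega) hkL]
            exact hrootle k hk hkn
        have houtL : arr.getD L 0 ≤ (heapify arr' n L).getD L 0 :=
          r4 _ hv' L Desc.refl hLn
        have houtside : ∀ x, ¬ Desc L x → x ≠ index →
            (heapify arr' n L).getD x 0 = arr.getD x 0 := by
          intro x h1 h2
          rw [r3 x h1, hget_other x h2 (fun he => h1 (he ▸ Desc.refl))]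
        have hout_index : (heapify arr' n L).getD index 0 = arr.getD L 0 := by
          rw [r3 index hLnotdesc_index, hget_i]
        have hLchild : L = 2*index+1 ∨ L = 2*index+2 := by
          rcases hs.1 with h | h
          · exact absurd h.symm hL
          · exact h.1
        have hnotdescS : ∀ s, (s = 2*index+1 ∨ s = 2*index+2) → s ≠ L →
            ∀ x, Desc s x → ¬ Desc L x := by
          intro s hsc hsne x hx
          exact not_desc_of_siblings hLchild hsc hsne hx
        rcases hj.split with hji | hd | hd
        · -- j = index
          rw [hji]
          constructor <;> intro hc
          · rcases hLchild with hLc | hLc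
            · rw [hout_index, ← hLc]; exact houtL
            · rw [hout_index,
                houtside (2*index+1) (hnotdescS _ (Or.inl rfl) (by omega) _ Desc.refl) (by omega)]
              exact hs.2.2.1 hc
          · rcases hLchild with hLc | hLc
            · rw [hout_index,
                houtside (2*index+2) (hnotdescS _ (Or.inr rfl) (by omega) _ Desc.refl) (by omega)]
              exact hs.2.2.2 hc
            · rw [hout_index, ← hLc]; exact houtL
        · -- j in the subtree of the left child
          by_cases hLc : L = 2*index+1
          · exact hpost j (hLc ▸ hd)
          · have hmain : ∀ x, Desc (2*index+1) x → ¬ Desc L x :=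
              hnotdescS _ (Or.inl rfl) (fun h => hLc h.symm)
            have hjne : j ≠ index := by have := hd.le; omega
            have e := hpre j (Desc.trans' Desc.refl.left hd) hjne
            refine ⟨?_, ?_⟩ <;> intro hc
            · rw [houtside j (hmain j hd) hjne,
                houtside _ (hmain _ hd.left) (by have := hd.le; omega)]
              exact e.1 hc
            · rw [houtside j (hmain j hd) hjne,
                houtside _ (hmain _ hd.right) (by have := hd.le; omega)]
              exact e.2 hc
        · -- j in the subtree of the right child
          by_cases hLc : L = 2*index+2
          · exact hpost j (hLc ▸ hd)
          · have hmain : ∀ x, Desc (2*index+2) x → ¬ Desc L x :=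
              hnotdescS _ (Or.inr rfl) (fun h => hLc h.symm)
            have hjne : j ≠ index := by have := hd.le; omega
            have e := hpre j (Desc.trans' Desc.refl.right hd) hjne
            refine ⟨?_, ?_⟩ <;> intro hc
            · rw [houtside j (hmain j hd) hjne,
                houtside _ (hmain _ hd.left) (by have := hd.le; omega)]
              exact e.1 hc
            · rw [houtside j (hmain j hd) hjne,
                houtside _ (hmain _ hd.right) (by have := hd.le; omega)]
              exact e.2 hc

lemma buildLoop_main (n : Nat) : ∀ (fuel : Nat) (idx : Int) (arr : List Int),
    arr.length = n → (idx + 1).toNat ≤ fuel →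
    (∀ j : Nat, idx < (j : Int) → EdgeOK arr n j) →
    (buildLoop arr n idx).Perm arr ∧ (buildLoop arr n idx).length = n ∧
    (∀ j, EdgeOK (buildLoop arr n idx) n j) := by
  intro fuel
  induction fuel with
  | zero =>
    intro idx arr hlen hf hedges
    rw [buildLoop, if_neg (by omega)]
    exact ⟨List.Perm.refl _, hlen, fun j => hedges j (by omega)⟩
  | succ f ih =>
    intro idx arr hlen hf hedges
    by_cases hidx : idx > -1
    · rw [buildLoop, if_pos hidx]
      set i0 := idx.toNat with hi0
      obtain ⟨h1, h2, h3, h4, h5⟩ := heapify_main n n arr i0 hlen (by omega)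
      have hpre : ∀ j', Desc i0 j' → j' ≠ i0 → EdgeOK arr n j' := by
        intro j' hd hne
        have := hd.lb hne
        exact hedges j' (by omega)
      have hedges2 : ∀ j : Nat, idx - 1 < (j:Int) → EdgeOK (heapify arr n i0) n j := by
        intro j hj
        by_cases hdj : Desc i0 j
        · exact h5 hpre j hdj
        · have hji : j ≠ i0 := fun h => hdj (h ▸ Desc.refl)
          have hchild : ∀ c, (c = 2*j+1 ∨ c = 2*j+2) → ¬ Desc i0 c := by
            intro c hcc hdc
            have hci : c ≠ i0 := by omega
            obtain ⟨j'', hj'', hc'⟩ := hdc.parent hci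
            have hjj : j'' = j := by omega
            exact hdj (hjj ▸ hj'')
          have e := hedges j (by omega)
          refine ⟨?_, ?_⟩ <;> intro hc
          · rw [h3 j hdj, h3 _ (hchild _ (Or.inl rfl))]; exact e.1 hc
          · rw [h3 j hdj, h3 _ (hchild _ (Or.inr rfl))]; exact e.2 hc
      obtain ⟨g1, g2, g3⟩ := ih (idx - 1) (heapify arr n i0) h1 (by omega) hedges2
      exact ⟨g1.trans h2, g2, g3⟩
    · rw [buildLoop, if_neg hidx]
      exact ⟨List.Perm.refl _, hlen, fun j => hedges j (by omega)⟩

lemma buildMinHeap_spec (arr : List Int) (n : Nat) (hlen : arr.length = n) :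
    (buildMinHeap arr n).Perm arr ∧ (buildMinHeap arr n).length = n ∧
    (∀ k, k < n → (buildMinHeap arr n).getD 0 0 ≤ (buildMinHeap arr n).getD k 0) := by
  unfold buildMinHeap
  have hfd : PySem.Int.floordiv (n : Int) 2 = (n : Int) / 2 :=
    PySem.Int.floordiv_eq_ediv_of_pos (by norm_num)
  have hedges : ∀ j : Nat, (PySem.Int.floordiv (n : Int) 2 - 1) < (j : Int) → EdgeOK arr n j := by
    intro j hj
    rw [hfd] at hj
    constructor <;> intro hc <;> exfalso <;> omega
  obtain ⟨g1, g2, g3⟩ := buildLoop_main n (PySem.Int.floordiv (n:Int) 2 - 1 + 1).toNat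
    (PySem.Int.floordiv (n:Int) 2 - 1) arr hlen (le_refl _) hedges
  exact ⟨g1, g2, fun k hk => root_le_desc _ n 0 (fun j _ => g3 j) k (desc_zero k) hk⟩

-- ---------- sorted-list bookkeeping ----------
lemma sortL_perm (l : List Int) : (sortL l).Perm l := PySem.List.sorted_perm l (fun x => x) false
lemma sortL_pairwise (l : List Int) : (sortL l).Pairwise (· ≤ ·) :=
  PySem.List.sorted_pairwise l (fun x => x)
lemma sortL_eq (l ys : List Int) (hp : ys.Perm l) (hpw : ys.Pairwise (· ≤ ·)) : sortL l = ys :=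
  PySem.List.sorted_id_eq_of_perm_of_pairwise l ys hp hpw
lemma sortL_sortL (l : List Int) : sortL (sortL l) = sortL l :=
  PySem.List.sorted_sorted l (fun x => x)

lemma sortL_cons_min (l : List Int) (m : Int) (hm : m ∈ l) (hmin : ∀ x ∈ l, m ≤ x) :
    ∃ t, sortL l = m :: t := by
  have hne : sortL l ≠ [] := by
    intro h
    have hmem : m ∈ sortL l := (sortL_perm l).mem_iff.mpr hm
    rw [h] at hmem
    exact List.not_mem_nil hmem
  obtain ⟨y, t, hyt⟩ := List.exists_cons_of_ne_nil hne
  have hy_mem : y ∈ l := (sortL_perm l).mem_iff.mp (by rw [hyt]; exact List.mem_cons_self)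
  have hle : y ≤ m := by
    have hm' : m ∈ y :: t := by rw [← hyt]; exact (sortL_perm l).mem_iff.mpr hm
    rcases List.mem_cons.mp hm' with rfl | hmt
    · exact le_refl _
    · exact List.rel_of_pairwise_cons (by rw [← hyt]; exact sortL_pairwise l) hmt
  have hym : y = m := le_antisymm hle (hmin y hy_mem)
  exact ⟨t, by rw [hyt, hym]⟩

lemma insortI_perm (x : Int) (l : List Int) : (insortI x l).Perm (x :: l) :=
  List.perm_orderedInsert _ x l
lemma insortI_pairwise (x : Int) (l : List Int) (h : l.Pairwise (· ≤ ·)) :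
    (insortI x l).Pairwise (· ≤ ·) := List.Pairwise.orderedInsert x l h
lemma insortI_front (x : Int) (l : List Int) (h : ∀ y ∈ l, x ≤ y) : insortI x l = x :: l := by
  cases l with
  | nil => rfl
  | cons y ys => simp [insortI, List.orderedInsert, h y (by simp)]

lemma G_nonneg : ∀ (b : Nat) (x : Int) (xs : List Int), (x :: xs).Pairwise (· ≤ ·) → 0 ≤ x →
    G b (x :: xs) = x + xs.sum - (if b % 2 = 1 then 2 * x else 0) := by
  intro b
  induction b using Nat.strong_induction_on with
  | _ b ih =>
    intro x xs hpw hx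
    match b with
    | 0 => simp [G_zero]
    | 1 =>
      rw [G_succ_cons, G_zero, (insortI_perm (-x) xs).sum_eq, List.sum_cons]
      rw [if_pos (by norm_num)]
      ring
    | (k+2) =>
      have hxall : ∀ y ∈ xs, x ≤ y := fun y hy => List.rel_of_pairwise_cons hpw hy
      have h1 : ∀ y ∈ xs, -x ≤ y := fun y hy => le_trans (by omega) (hxall y hy)
      rw [G_succ_cons, insortI_front _ _ h1, G_succ_cons, neg_neg, insortI_front _ _ hxall,
        ih k (by omega) x xs hpw hx]
      have hpar : (k+2) % 2 = k % 2 := by omega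
      rw [hpar]

-- one flip of a pending minimum, shared by both ports' flip loops
lemma flip_step (arr : List Int) (i : Nat) (hidx : i < arr.length)
    (hpref : ∀ k, k < i → 0 ≤ arr.getD k 0)
    (hpw : (arr.drop i).Pairwise (· ≤ ·)) (hneg : arr.getD i 0 < 0) :
    ∃ t, sortL arr = arr.getD i 0 :: t ∧
      sortL (arr.set i (-(arr.getD i 0))) = insortI (-(arr.getD i 0)) t ∧
      (∀ k, k < i+1 → 0 ≤ (arr.set i (-(arr.getD i 0))).getD k 0) ∧
      ((arr.set i (-(arr.getD i 0))).drop (i+1)).Pairwise (· ≤ ·) := by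
  have hdropcons : arr.drop i = arr[i] :: arr.drop (i+1) := List.drop_eq_getElem_cons hidx
  have hminall : ∀ x ∈ arr, arr.getD i 0 ≤ x := by
    intro x hx
    obtain ⟨k, hk, rfl⟩ := List.mem_iff_getElem.mp hx
    by_cases hki : k < i
    · have := hpref k hki
      rw [← getD_eq_getElem arr k hk]
      omega
    · by_cases hkei : k = i
      · subst hkei; rw [← getD_eq_getElem arr k hk]
      · have hmem := getElem_mem_drop_succ arr i k (by omega) hk
        have hrel := List.rel_of_pairwise_cons (hdropcons ▸ hpw) hmem
        rw [getD_eq_getElem arr i hidx]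
        exact hrel
  obtain ⟨t, ht⟩ := sortL_cons_min arr _ (getD_mem arr i hidx) hminall
  have htpw : t.Pairwise (· ≤ ·) := by
    have := sortL_pairwise arr
    rw [ht] at this
    exact (List.pairwise_cons.mp this).2
  refine ⟨t, ht, ?_, ?_, ?_⟩
  · have hp1 : (arr.set i (-(arr.getD i 0))).Perm ((-(arr.getD i 0)) :: arr.eraseIdx i) :=
      List.set_perm_cons_eraseIdx hidx _
    have hp2 : (arr.getD i 0 :: arr.eraseIdx i).Perm arr := by
      have := List.getElem_cons_eraseIdx_perm hidx
      rwa [← getD_eq_getElem arr i hidx] at this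
    have hp4 : (arr.eraseIdx i).Perm t := by
      have h3 : (arr.getD i 0 :: arr.eraseIdx i).Perm (arr.getD i 0 :: t) := by
        refine hp2.trans ?_
        rw [← ht]
        exact (sortL_perm arr).symm
      exact h3.cons_inv
    exact sortL_eq _ _ ((insortI_perm _ t).trans ((hp1.trans (hp4.cons _)).symm))
      (insortI_pairwise _ _ htpw)
  · intro k hk
    by_cases hki : k = i
    · subst hki; rw [getD_set_self _ _ _ hidx]; omega
    · rw [getD_set_ne _ _ _ _ hki]; exact hpref k (by omega)
  · rw [List.drop_set_of_lt (show i < i + 1 by omega)]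
    rw [hdropcons] at hpw
    exact (List.pairwise_cons.mp hpw).2

-- every element is nonnegative once the flip loop stops with budget left
lemma all_nonneg_of_stop (arr : List Int) (i : Nat) (hi : i ≤ arr.length)
    (hpref : ∀ k, k < i → 0 ≤ arr.getD k 0)
    (hpw : (arr.drop i).Pairwise (· ≤ ·))
    (hstop : i = arr.length ∨ 0 ≤ arr.getD i 0) :
    ∀ k, k < arr.length → 0 ≤ arr.getD k 0 := by
  intro k hk
  by_cases hki : k < i
  · exact hpref k hki
  · have hil : i < arr.length := by omega
    have hnn : 0 ≤ arr.getD i 0 := by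
      rcases hstop with h | h
      · omega
      · exact h
    by_cases hkei : k = i
    · subst hkei; exact hnn
    · have hdropcons : arr.drop i = arr[i] :: arr.drop (i+1) := List.drop_eq_getElem_cons hil
      have hmem := getElem_mem_drop_succ arr i k (by omega) hk
      have hrel := List.rel_of_pairwise_cons (hdropcons ▸ hpw) hmem
      rw [getD_eq_getElem arr k hk]
      refine le_trans ?_ hrel
      rw [← getD_eq_getElem arr i hil]
      exact hnn

-- ---------- the tail computations ----------
lemma negLoop_sum (idx : Nat) : ∀ (fuel : Nat) (b : Int) (arr : List Int),
    b.toNat ≤ fuel → idx < arr.length →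
    (negLoop arr idx b).sum = arr.sum - (if b.toNat % 2 = 1 then 2 * arr.getD idx 0 else 0) := by
  intro fuel
  induction fuel with
  | zero =>
    intro b arr hf hidx
    rw [negLoop, if_neg (by omega)]
    have hb : b.toNat = 0 := by omega
    simp [hb]
  | succ f ih =>
    intro b arr hf hidx
    by_cases hb : b > 0
    · rw [negLoop, if_pos hb]
      have hlen2 : idx < (arr.set idx (-(arr.getD idx 0))).length := by simpa using hidx
      rw [ih (b-1) _ (by omega) hlen2, sum_set _ _ _ hidx, getD_set_self _ _ _ hidx]
      split_ifs <;> omega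
    · rw [negLoop, if_neg hb]
      have hb0 : b.toNat = 0 := by omega
      simp [hb0]

lemma minFold_spec (arr : List Int) : ∀ (m a : Nat) (p : Int × Nat),
    arr.getD p.2 0 = p.1 →
    ∀ q, q = (List.range' a m).foldl
        (fun p i => if arr.getD i 0 < p.1 then (arr.getD i 0, i) else p) p →
    arr.getD q.2 0 = q.1 ∧ q.1 ≤ p.1 ∧ (q.2 = p.2 ∨ (a ≤ q.2 ∧ q.2 < a + m)) ∧
    (∀ k, a ≤ k → k < a + m → q.1 ≤ arr.getD k 0) := by
  intro m
  induction m with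
  | zero =>
    intro a p hp q hq
    simp only [List.range'_zero, List.foldl_nil] at hq
    subst hq
    exact ⟨hp, le_refl _, Or.inl rfl, fun k h1 h2 => absurd h2 (by omega)⟩
  | succ m ih =>
    intro a p hp q hq
    rw [List.range'_succ, List.foldl_cons] at hq
    set p' := if arr.getD a 0 < p.1 then (arr.getD a 0, a) else p with hp'def
    have hp'1 : arr.getD p'.2 0 = p'.1 := by
      rw [hp'def]; split_ifs with h
      · rfl
      · exact hp
    obtain ⟨q1, q2, q3, q4⟩ := ih (a+1) p' hp'1 q hq
    have hp'le : p'.1 ≤ p.1 := by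
      rw [hp'def]; split_ifs with h
      · exact le_of_lt h
      · exact le_refl _
    have hp'a : p'.1 ≤ arr.getD a 0 := by
      rw [hp'def]; split_ifs with h
      · exact le_refl _
      · omega
    refine ⟨q1, le_trans q2 hp'le, ?_, ?_⟩
    · rcases q3 with hq3 | hq3
      · rw [hp'def] at hq3
        split_ifs at hq3 with h
        · right; rw [hq3]; omega
        · left; exact hq3
      · right; omega
    · intro k hk1 hk2
      by_cases hka : k = a
      · subst hka; exact le_trans q2 hp'a
      · exact q4 k (by omega) (by omega)

lemma minScan_spec (arr : List Int) (n : Nat) (hlen : arr.length = n) (hn : 0 < n) :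
    (minScan arr n).2 < n ∧ arr.getD (minScan arr n).2 0 = (minScan arr n).1 ∧
    (∀ k, k < n → (minScan arr n).1 ≤ arr.getD k 0) := by
  obtain ⟨q1, q2, q3, q4⟩ := minFold_spec arr (n-1) 1 (arr.getD 0 0, 0) rfl (minScan arr n) rfl
  refine ⟨?_, q1, ?_⟩
  · rcases q3 with h | h
    · rw [h]; exact hn
    · omega
  · intro k hk
    rcases Nat.eq_zero_or_pos k with rfl | hkpos
    · exact q2
    · exact q4 k (by omega) (by omega)

lemma mod_two_toNat (b : Int) (hb : 0 < b) : (PySem.Int.mod b 2 = 1) ↔ b.toNat % 2 = 1 := by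
  rw [PySem.Int.mod_eq_emod_of_pos (by norm_num)]
  omega

lemma branch2rest_nonneg (arr : List Int) (n : Nat) (b : Int) (hlen : arr.length = n) (hn : 0 < n)
    (hnn : ∀ k, k < n → 0 ≤ arr.getD k 0) :
    branch2rest arr n b = G b.toNat (sortL arr) := by
  by_cases hb : b > 0
  · unfold branch2rest
    rw [if_pos hb]
    obtain ⟨m1, m2, m3⟩ := minScan_spec arr n hlen hn
    rw [negLoop_sum (minScan arr n).2 b.toNat b arr (le_refl _) (by omega)]
    have hmem : arr.getD (minScan arr n).2 0 ∈ arr := getD_mem _ _ (by omega)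
    have hminall : ∀ x ∈ arr, (minScan arr n).1 ≤ x := by
      intro x hx
      obtain ⟨k, hk, rfl⟩ := List.mem_iff_getElem.mp hx
      rw [← getD_eq_getElem arr k hk]
      exact m3 k (by omega)
    obtain ⟨t, ht⟩ := sortL_cons_min arr (minScan arr n).1 (m2 ▸ hmem) hminall
    have htpw : ((minScan arr n).1 :: t).Pairwise (· ≤ ·) := by
      rw [← ht]; exact sortL_pairwise arr
    have hnn0 : 0 ≤ (minScan arr n).1 := by
      rw [← m2]; exact hnn _ (by omega)
    rw [ht, G_nonneg b.toNat _ _ htpw hnn0]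
    have hsum : (minScan arr n).1 + t.sum = arr.sum := by
      have := (sortL_perm arr).sum_eq
      rw [ht, List.sum_cons] at this
      exact this
    rw [m2]
    split_ifs <;> omega
  · unfold branch2rest
    rw [if_neg hb]
    have hb0 : b.toNat = 0 := by omega
    rw [hb0, G_zero, (sortL_perm arr).sum_eq]

-- ---------- branch 1: the heap loop computes G ----------
lemma loop1_sum : ∀ (fuel : Nat) (b : Int) (arr : List Int), b.toNat ≤ fuel → arr ≠ [] →
    (loop1 arr arr.length b).sum = G b.toNat (sortL arr) := by
  intro fuel
  induction fuel with
  | zero =>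
    intro b arr hf hne
    rw [loop1, if_neg (by omega)]
    have hb : b.toNat = 0 := by omega
    rw [hb, G_zero, (sortL_perm arr).sum_eq]
  | succ f ih =>
    intro b arr hf hne
    by_cases hb : b > 0
    · have hn : 0 < arr.length := List.length_pos_of_ne_nil hne
      rw [loop1, if_pos hb]
      set n := arr.length with hn_def
      obtain ⟨hperm, hlen, hmin⟩ := buildMinHeap_spec arr n hn_def.symm
      set h := buildMinHeap arr n with hh
      set m := h.getD 0 0 with hm
      have hmem : m ∈ arr := hperm.mem_iff.mp (getD_mem h 0 (by omega))
      have hminall : ∀ x ∈ arr, m ≤ x := by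
        intro x hx
        have hx' : x ∈ h := hperm.mem_iff.mpr hx
        obtain ⟨k, hk, rfl⟩ := List.mem_iff_getElem.mp hx'
        rw [← getD_eq_getElem h k hk]
        exact hmin k (by omega)
      obtain ⟨t, ht⟩ := sortL_cons_min arr m hmem hminall
      have htpw : t.Pairwise (· ≤ ·) := by
        have := sortL_pairwise arr
        rw [ht] at this
        exact (List.pairwise_cons.mp this).2
      set h2 := pySwap h 0 (n-1) with hh2
      have hlen2 : h2.length = n := by rw [hh2, length_pySwap, hlen]
      have hget : h2.getD (n-1) 0 = m := by
        rw [hh2, hm]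
        exact getD_pySwap_fst h 0 (n-1) (by omega) (by omega)
      set h3 := h2.set (n-1) (-(h2.getD (n-1) 0)) with hh3
      have hlen3 : h3.length = n := by rw [hh3]; simpa using hlen2
      have hne3 : h3 ≠ [] := by
        intro hcon
        rw [hcon] at hlen3
        simp at hlen3
        omega
      have hp1 : h3.Perm ((-m) :: h2.eraseIdx (n-1)) := by
        rw [hh3, hget]
        exact List.set_perm_cons_eraseIdx (by omega) _
      have hp2 : (m :: h2.eraseIdx (n-1)).Perm h2 := by
        have := List.getElem_cons_eraseIdx_perm (show n - 1 < h2.length by omega)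
        rwa [← getD_eq_getElem h2 (n-1) (by omega), hget] at this
      have hp4 : (h2.eraseIdx (n-1)).Perm t := by
        have hp3 : (m :: h2.eraseIdx (n-1)).Perm (m :: t) := by
          refine hp2.trans ?_
          refine ((pySwap_perm h 0 (n-1) (by omega) (by omega)).trans hperm).trans ?_
          rw [← ht]
          exact (sortL_perm arr).symm
        exact hp3.cons_inv
      have hp5 : h3.Perm ((-m) :: t) := hp1.trans (hp4.cons _)
      have hsort3 : sortL h3 = insortI (-m) t :=
        sortL_eq h3 _ ((insortI_perm (-m) t).trans hp5.symm) (insortI_pairwise _ _ htpw)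
      have hrw := ih (b-1) h3 (by omega) hne3
      rw [hlen3] at hrw
      rw [hrw]
      obtain ⟨k, hk⟩ : ∃ k, b.toNat = k + 1 := ⟨b.toNat - 1, by omega⟩
      rw [show (b-1).toNat = k from by omega, hsort3, ht, hk, G_succ_cons]
    · rw [loop1, if_neg hb]
      have hb0 : b.toNat = 0 := by omega
      rw [hb0, G_zero, (sortL_perm arr).sum_eq]

-- ---------- branch 2 of A ----------
lemma flipA_sum (n : Nat) : ∀ (fuel : Nat) (b : Int) (arr : List Int) (i : Nat),
    b.toNat ≤ fuel → arr.length = n → i ≤ n → 0 < n →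
    (∀ k, k < i → 0 ≤ arr.getD k 0) → (arr.drop i).Pairwise (· ≤ ·) →
    branch2rest (flipLoopA arr n i b).1 n (flipLoopA arr n i b).2.2 = G b.toNat (sortL arr) := by
  intro fuel
  induction fuel with
  | zero =>
    intro b arr i hf hlen hi hn hpref hpw
    rw [flipLoopA, if_neg (by omega)]
    dsimp only
    unfold branch2rest
    rw [if_neg (by omega)]
    have hb0 : b.toNat = 0 := by omega
    rw [hb0, G_zero, (sortL_perm arr).sum_eq]
  | succ f ih =>
    intro b arr i hf hlen hi hn hpref hpw
    by_cases hb : b > 0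
    · by_cases hin : i < n
      · by_cases hneg : arr.getD i 0 < 0
        · rw [flipLoopA, if_pos hb, if_pos hin, if_pos hneg]
          obtain ⟨t, ht, hsort2, hpref2, hpw2⟩ :=
            flip_step arr i (by omega) hpref hpw hneg
          have hrw := ih (b-1) (arr.set i (-(arr.getD i 0))) (i+1) (by omega)
            (by simpa using hlen) (by omega) hn hpref2 hpw2
          rw [hrw]
          obtain ⟨k, hk⟩ : ∃ k, b.toNat = k + 1 := ⟨b.toNat - 1, by omega⟩
          rw [show (b-1).toNat = k from by omega, hsort2, ht, hk, G_succ_cons]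
        · rw [flipLoopA, if_pos hb, if_pos hin, if_neg hneg]
          dsimp only
          exact branch2rest_nonneg arr n b hlen hn
            (fun k hk => all_nonneg_of_stop arr i (by omega) hpref hpw
              (Or.inr (by omega)) k (by omega))
      · rw [flipLoopA, if_pos hb, if_neg hin]
        dsimp only
        exact branch2rest_nonneg arr n b hlen hn
          (fun k hk => hpref k (by omega))
    · rw [flipLoopA, if_neg hb]
      dsimp only
      unfold branch2rest
      rw [if_neg hb]
      have hb0 : b.toNat = 0 := by omega
      rw [hb0, G_zero, (sortL_perm arr).sum_eq]

-- ---------- B's loop ----------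
lemma altRest_nonneg (v : List Int) (b : Int) (hv : v ≠ []) (hnn : ∀ x ∈ v, 0 ≤ x) :
    altRest v b = G b.toNat (sortL v) := by
  by_cases hb : b > 0
  · obtain ⟨m, hm⟩ : ∃ m, PySem.List.min? v (fun y => y) = some m := by
      cases hmv : PySem.List.min? v (fun y => y) with
      | none => exact absurd ((PySem.List.min?_eq_none_iff v (fun y => y)).mp hmv) hv
      | some m => exact ⟨m, rfl⟩
    have hmem : m ∈ v := PySem.List.min?_mem hm
    have hminall : ∀ x ∈ v, m ≤ x := fun x hx => PySem.List.min?_isMin hm x hx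
    obtain ⟨t, ht⟩ := sortL_cons_min v m hmem hminall
    have htpw : (m :: t).Pairwise (· ≤ ·) := by rw [← ht]; exact sortL_pairwise v
    have hsum : m + t.sum = v.sum := by
      have := (sortL_perm v).sum_eq
      rw [ht, List.sum_cons] at this
      exact this
    unfold altRest
    rw [hm, ht, G_nonneg b.toNat m t htpw (hnn m hmem)]
    by_cases hpar : PySem.Int.mod b 2 = 1
    · rw [if_pos ⟨hb, hpar⟩, if_pos ((mod_two_toNat b hb).mp hpar)]
      show v.sum - 2 * m = m + t.sum - 2 * m
      omega
    · rw [if_neg (fun hc => hpar hc.2), if_neg (fun hc => hpar ((mod_two_toNat b hb).mpr hc))]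
      omega
  · unfold altRest
    rw [if_neg (fun hc => hb hc.1)]
    have hb0 : b.toNat = 0 := by omega
    rw [hb0, G_zero, (sortL_perm v).sum_eq]

lemma flipB_sum : ∀ (fuel : Nat) (b : Int) (vals : List Int) (k : Nat),
    b.toNat ≤ fuel → k ≤ vals.length → vals ≠ [] →
    (∀ j, j < k → 0 ≤ vals.getD j 0) → (vals.drop k).Pairwise (· ≤ ·) →
    altRest (flipLoopB vals k b).1 (flipLoopB vals k b).2 = G b.toNat (sortL vals) := by
  intro fuel
  induction fuel with
  | zero =>
    intro b vals k hf hk hne hpref hpw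
    rw [flipLoopB, if_neg (fun hc => by omega)]
    dsimp only
    unfold altRest
    rw [if_neg (fun hc => by omega)]
    have hb0 : b.toNat = 0 := by omega
    rw [hb0, G_zero, (sortL_perm vals).sum_eq]
  | succ f ih =>
    intro b vals k hf hk hne hpref hpw
    by_cases hcond : k < vals.length ∧ b > 0 ∧ vals.getD k 0 < 0
    · obtain ⟨hkl, hb, hneg⟩ := hcond
      rw [flipLoopB, if_pos ⟨hkl, hb, hneg⟩]
      obtain ⟨t, ht, hsort2, hpref2, hpw2⟩ := flip_step vals k hkl hpref hpw hneg
      have hne2 : vals.set k (-(vals.getD k 0)) ≠ [] :=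
        List.ne_nil_of_length_pos (by rw [List.length_set]; omega)
      have hrw := ih (b-1) (vals.set k (-(vals.getD k 0))) (k+1) (by omega)
        (by simpa using hkl) hne2 hpref2 hpw2
      rw [hrw]
      obtain ⟨j, hj⟩ : ∃ j, b.toNat = j + 1 := ⟨b.toNat - 1, by omega⟩
      rw [show (b-1).toNat = j from by omega, hsort2, ht, hj, G_succ_cons]
    · rw [flipLoopB, if_neg hcond]
      dsimp only
      by_cases hb : b > 0
      · apply altRest_nonneg vals b hne
        intro x hx
        obtain ⟨j, hj, rfl⟩ := List.mem_iff_getElem.mp hx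
        rw [← getD_eq_getElem _ _ hj]
        have hstop : k = vals.length ∨ 0 ≤ vals.getD k 0 := by
          by_cases hkl : k < vals.length
          · right
            by_cases hng : vals.getD k 0 < 0
            · exact absurd ⟨hkl, hb, hng⟩ hcond
            · omega
          · left; omega
        exact all_nonneg_of_stop vals k hk hpref hpw hstop j hj
      · unfold altRest
        rw [if_neg (fun hc => hb hc.1)]
        have hb0 : b.toNat = 0 := by omega
        rw [hb0, G_zero, (sortL_perm vals).sum_eq]

-- ===== VERDICT (by name: the statement is the Claim_ definition above) =====
theorem solve_spec : Claim_equal_solve := by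
  intro A B _ hpre
  unfold Spec_solve
  by_cases hA : A = []
  · subst hA
    have hB : B ≤ 0 := hpre rfl
    have hs0 : PySem.List.sorted ([] : List Int) (fun x => x) false = [] := rfl
    simp only [solve, solve_alt, List.length_nil, Nat.cast_zero, hs0]
    have hfd : PySem.Int.floordiv (0 : Int) 2 = 0 := by decide
    rw [hfd]
    have hRHS : altRest (flipLoopB ([] : List Int) 0 B).1 (flipLoopB ([] : List Int) 0 B).2 = 0 := by
      rw [flipLoopB, if_neg (fun hc => by simp at hc)]
      dsimp only
      unfold altRest
      rw [if_neg (fun hc => by omega)]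
      rfl
    rw [hRHS]
    by_cases hBneg : B < 0
    · rw [if_pos hBneg, loop1, if_neg (by omega)]
      rfl
    · rw [if_neg hBneg, flipLoopA, if_neg (by omega)]
      dsimp only
      unfold branch2rest
      rw [if_neg (by omega)]
      rfl
  · have hn : 0 < A.length := List.length_pos_of_ne_nil hA
    have hsortne : sortL A ≠ [] := fun hcon =>
      hA ((PySem.List.sorted_eq_nil_iff A (fun x => x) false).mp hcon)
    have hRHS : solve_alt A B = G B.toNat (sortL A) := by
      show altRest (flipLoopB (sortL A) 0 B).1 (flipLoopB (sortL A) 0 B).2 = G B.toNat (sortL A)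
      have := flipB_sum B.toNat B (sortL A) 0 (le_refl _) (by omega) hsortne
        (fun j hj => absurd hj (by omega)) (by simpa using sortL_pairwise A)
      rw [this, sortL_sortL]
    rw [hRHS]
    show (if B < PySem.Int.floordiv (A.length : Int) 2 then (loop1 A A.length B).sum
      else branch2rest (flipLoopA (PySem.List.sorted A (fun x => x) false) A.length 0 B).1
        A.length (flipLoopA (PySem.List.sorted A (fun x => x) false) A.length 0 B).2.2)
      = G B.toNat (sortL A)
    by_cases hcase : B < PySem.Int.floordiv (A.length : Int) 2
    · rw [if_pos hcase]
      exact loop1_sum B.toNat B A (le_refl _) hA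
    · rw [if_neg hcase]
      have hlensort : (sortL A).length = A.length := (sortL_perm A).length_eq
      have := flipA_sum A.length B.toNat B (sortL A) 0 (le_refl _) hlensort (by omega) hn
        (fun k hk => absurd hk (by omega)) (by simpa using sortL_pairwise A)
      show branch2rest (flipLoopA (sortL A) A.length 0 B).1 A.length
        (flipLoopA (sortL A) A.length 0 B).2.2 = G B.toNat (sortL A)
      rw [this, sortL_sortL]
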